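-- pv_equiv track=rewrite | github.com/mdiallo000/python-dataStructures-Algos | LeetcodeQuestions/Hash_Table_Dict/maximum_Number_of_Words_You_Can_Type.py | canBeTypedWord
-- ===== SOURCE A (Python) =====
-- def canBeTypedWord(text, brokenLetters):
--
--     res = 0
--     for w in text.split(" "):
--         for c in w:
--             if c in brokenLetters:
--                 res -= 1
--                 break
--         res += 1
--     return res
-- ===== SOURCE B (Python) =====
-- def canBeTypedWord(text, brokenLetters):
--     broken = set(brokenLetters)
--     count = 0
--     ok = True
--     for c in text:
--         if c == ' ':
--             count += ok
--             ok = True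
--         elif c in broken:
--             ok = False
--     return count + ok
-- ===== Notes on version B (the rewrite author's own statement) =====
-- stated objective: alternative
-- what changed: Replaces split-into-words plus a per-word inner scan with break by one streaming left-to-right pass over the raw characters, maintaining a count and a current-word-clean flag that is flushed at each space and at the end; no word list is ever built.
import Mathlib
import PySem

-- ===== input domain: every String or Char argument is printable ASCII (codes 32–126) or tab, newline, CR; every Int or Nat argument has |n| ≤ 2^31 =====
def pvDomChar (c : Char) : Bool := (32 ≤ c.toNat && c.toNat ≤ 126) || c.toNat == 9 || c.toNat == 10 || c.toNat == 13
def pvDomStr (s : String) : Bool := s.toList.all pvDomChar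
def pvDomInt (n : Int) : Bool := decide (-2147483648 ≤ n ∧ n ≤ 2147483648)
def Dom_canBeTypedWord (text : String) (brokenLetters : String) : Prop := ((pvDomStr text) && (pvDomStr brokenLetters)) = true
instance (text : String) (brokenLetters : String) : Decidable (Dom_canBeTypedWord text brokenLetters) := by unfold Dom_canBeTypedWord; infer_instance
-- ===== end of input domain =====

-- B replaces A's split-into-words + per-word inner scan with break by a single streaming
-- pass over the characters with a count and a current-word-clean flag (objective: alternative).
-- ===== PORT A =====
-- inner 'for c in w: if c in brokenLetters: res -= 1; break', then the 'res += 1' after the loop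
def canBeTypedInnerA (broken : List Char) : List Char → Int → Int
  | [], res => res + 1
  | c :: cs, res => if c ∈ broken then (res - 1) + 1 else canBeTypedInnerA broken cs res

def canBeTypedWord (text : String) (brokenLetters : String) : Int :=
  (PySem.Chars.splitOn text.toList " ".toList).foldl
    (fun res w => canBeTypedInnerA brokenLetters.toList w res) 0

-- ===== PORT B =====
-- Source B loop body: on ' ' flush the clean flag into the count, on a broken letter clear it
def canBeTypedStep (broken : PySem.Set Char) (st : Int × Bool) (c : Char) : Int × Bool :=
  if c = ' ' then (st.1 + (if st.2 then 1 else 0), true)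
  else if PySem.Set.contains broken c then (st.1, false)
  else st

def canBeTypedWord_alt (text : String) (brokenLetters : String) : Int :=
  let broken : PySem.Set Char := PySem.Set.ofList brokenLetters.toList
  let st := text.toList.foldl (canBeTypedStep broken) (0, true)
  st.1 + (if st.2 then 1 else 0)

-- ===== PRECONDITION & SPEC =====
def Spec_canBeTypedWord (text : String) (brokenLetters : String) (out : Int) : Prop := out = canBeTypedWord_alt text brokenLetters
instance (text : String) (brokenLetters : String) (out : Int) : Decidable (Spec_canBeTypedWord text brokenLetters out) := by unfold Spec_canBeTypedWord; infer_instance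

-- ===== CLAIM =====
def Claim_equal_canBeTypedWord : Prop := ∀ (text : String) (brokenLetters : String), Dom_canBeTypedWord text brokenLetters → Spec_canBeTypedWord text brokenLetters (canBeTypedWord text brokenLetters)

-- ===== LEMMAS AND PROOFS =====

-- splitting on a single space, written as plain structural recursion
def wsplit : List Char → List (List Char)
  | [] => [[]]
  | c :: rest =>
    if c = ' ' then [] :: wsplit rest
    else match wsplit rest with
      | [] => [[c]]
      | w :: ws => (c :: w) :: ws

lemma wsplit_ne_nil (cs : List Char) : wsplit cs ≠ [] := by
  cases cs with
  | nil => simp [wsplit]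
  | cons c rest =>
    simp only [wsplit]
    split_ifs
    · simp
    · cases h : wsplit rest <;> simp

lemma go_space (fuel : Nat) : ∀ (l cur : List Char) (acc : List (List Char)), l.length ≤ fuel →
    PySem.Chars.splitOn.go [' '] fuel l cur acc =
      acc.reverse ++ (match wsplit l with
        | [] => []
        | w :: ws => (cur.reverse ++ w) :: ws) := by
  induction fuel with
  | zero =>
    intro l cur acc h
    have hl : l = [] := List.eq_nil_of_length_eq_zero (Nat.le_zero.mp h)
    subst hl
    simp [PySem.Chars.splitOn.go, wsplit]
  | succ fuel ih =>
    intro l cur acc h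
    cases l with
    | nil => simp [PySem.Chars.splitOn.go, wsplit]
    | cons c rest =>
      by_cases hc : c = ' '
      · subst hc
        have : PySem.Chars.splitOn.go [' '] (fuel + 1) (' ' :: rest) cur acc
            = PySem.Chars.splitOn.go [' '] fuel rest [] (cur.reverse :: acc) := by
          simp [PySem.Chars.splitOn.go, List.isPrefixOf]
        rw [this, ih rest [] (cur.reverse :: acc) (by simpa using Nat.lt_succ_iff.mp (by simpa using h))]
        obtain ⟨w, ws, hws⟩ : ∃ w ws, wsplit rest = w :: ws := by
          cases hr : wsplit rest with
          | nil => exact absurd hr (wsplit_ne_nil rest)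
          | cons w ws => exact ⟨w, ws, rfl⟩
        simp [wsplit, hws]
      · have : PySem.Chars.splitOn.go [' '] (fuel + 1) (c :: rest) cur acc
            = PySem.Chars.splitOn.go [' '] fuel rest (c :: cur) acc := by
          simp [PySem.Chars.splitOn.go, List.isPrefixOf, Ne.symm hc]
        rw [this, ih rest (c :: cur) acc (by simpa using Nat.lt_succ_iff.mp (by simpa using h))]
        obtain ⟨w, ws, hws⟩ : ∃ w ws, wsplit rest = w :: ws := by
          cases hr : wsplit rest with
          | nil => exact absurd hr (wsplit_ne_nil rest)
          | cons w ws => exact ⟨w, ws, rfl⟩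
        simp [wsplit, hc, hws]

lemma splitOn_space (cs : List Char) : PySem.Chars.splitOn cs [' '] = wsplit cs := by
  unfold PySem.Chars.splitOn
  rw [go_space (cs.length + 1) cs [] [] (Nat.le_succ _)]
  obtain ⟨w, ws, hws⟩ : ∃ w ws, wsplit cs = w :: ws := by
    cases hr : wsplit cs with
    | nil => exact absurd hr (wsplit_ne_nil cs)
    | cons w ws => exact ⟨w, ws, rfl⟩
  simp [hws]

lemma innerA_eq (broken : List Char) (cs : List Char) (res : Int) :
    canBeTypedInnerA broken cs res = res + (if ∀ c ∈ cs, c ∉ broken then 1 else 0) := by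
  induction cs generalizing res with
  | nil => simp [canBeTypedInnerA]
  | cons c cs ih =>
    simp only [canBeTypedInnerA]
    by_cases h : c ∈ broken
    · rw [if_pos h, if_neg (fun hall => (hall c List.mem_cons_self) h)]
      ring
    · rw [if_neg h, ih]
      simp [h]

def countClean (bl : List Char) : List (List Char) → Int
  | [] => 0
  | w :: ws => (if ∀ c ∈ w, c ∉ bl then 1 else 0) + countClean bl ws

lemma foldl_innerA (bl : List Char) (ws : List (List Char)) (acc : Int) :
    ws.foldl (fun res w => canBeTypedInnerA bl w res) acc = acc + countClean bl ws := by
  induction ws generalizing acc with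
  | nil => simp [countClean]
  | cons w ws ih =>
    rw [List.foldl_cons, innerA_eq, ih, countClean, ← add_assoc]

lemma stream_eq (bl : List Char) : ∀ (cs : List Char) (n : Int) (ok : Bool) (w : List Char) (ws : List (List Char)),
    wsplit cs = w :: ws →
    (cs.foldl (canBeTypedStep (PySem.Set.ofList bl)) (n, ok)).1
      + (if (cs.foldl (canBeTypedStep (PySem.Set.ofList bl)) (n, ok)).2 then (1 : Int) else 0)
    = n + (if ok = true ∧ ∀ c ∈ w, c ∉ bl then 1 else 0) + countClean bl ws := by
  intro cs
  induction cs with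
  | nil =>
    intro n ok w ws hws
    simp [wsplit] at hws
    obtain ⟨hw, hws'⟩ := hws
    subst hw; subst hws'
    cases ok <;> simp [countClean]
  | cons c rest ih =>
    intro n ok w ws hws
    by_cases hc : c = ' '
    · subst hc
      simp only [wsplit] at hws
      obtain ⟨w', ws', hr⟩ : ∃ w' ws', wsplit rest = w' :: ws' := by
        cases h : wsplit rest with
        | nil => exact absurd h (wsplit_ne_nil rest)
        | cons a b => exact ⟨a, b, rfl⟩
      rw [hr] at hws
      cases hws
      rw [List.foldl_cons]
      have hstep : canBeTypedStep (PySem.Set.ofList bl) (n, ok) ' '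
          = (n + (if ok then 1 else 0), true) := by simp [canBeTypedStep]
      rw [hstep, ih _ _ _ _ hr, countClean]
      have h1 : (if true = true ∧ ∀ c ∈ w', c ∉ bl then (1 : Int) else 0)
          = if ∀ c ∈ w', c ∉ bl then 1 else 0 := by simp
      have h2 : (if ok = true ∧ ∀ c ∈ ([] : List Char), c ∉ bl then (1 : Int) else 0)
          = if ok then 1 else 0 := by cases ok <;> simp
      rw [h1, h2]
      ring
    · simp only [wsplit, if_neg hc] at hws
      obtain ⟨w', ws', hr⟩ : ∃ w' ws', wsplit rest = w' :: ws' := by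
        cases h : wsplit rest with
        | nil => exact absurd h (wsplit_ne_nil rest)
        | cons a b => exact ⟨a, b, rfl⟩
      rw [hr] at hws
      cases hws
      rw [List.foldl_cons]
      by_cases hb : c ∈ bl
      · have hstep : canBeTypedStep (PySem.Set.ofList bl) (n, ok) c = (n, false) := by
          simp [canBeTypedStep, hc, hb]
        rw [hstep, ih _ _ _ _ hr, if_neg (by simp),
          if_neg (fun h => (h.2 c List.mem_cons_self) hb)]
      · have hstep : canBeTypedStep (PySem.Set.ofList bl) (n, ok) c = (n, ok) := by
          simp [canBeTypedStep, hc, hb]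
        rw [hstep, ih _ _ _ _ hr,
          if_congr (iff_of_eq (by simp [hb]) :
            (ok = true ∧ ∀ d ∈ w', d ∉ bl) ↔ (ok = true ∧ ∀ d ∈ c :: w', d ∉ bl)) rfl rfl]

-- ===== VERDICT =====
theorem canBeTypedWord_spec : Claim_equal_canBeTypedWord := by
  intro text brokenLetters _
  unfold Spec_canBeTypedWord canBeTypedWord canBeTypedWord_alt
  have hsep : (" " : String).toList = [' '] := rfl
  rw [hsep, splitOn_space, foldl_innerA]
  obtain ⟨w, ws, hws⟩ : ∃ w ws, wsplit text.toList = w :: ws := by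
    cases h : wsplit text.toList with
    | nil => exact absurd h (wsplit_ne_nil _)
    | cons a b => exact ⟨a, b, rfl⟩
  rw [hws]
  simp only []
  rw [stream_eq brokenLetters.toList text.toList 0 true w ws hws, countClean]
  have h1 : (if true = true ∧ ∀ c ∈ w, c ∉ brokenLetters.toList then (1 : Int) else 0)
      = if ∀ c ∈ w, c ∉ brokenLetters.toList then 1 else 0 := by simp
  rw [h1]
  ring
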